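-- pv_equiv track=rewrite | github.com/piotroramus/Computational-Geometry-2015 | project/tests/algo_tests.py | _the_same_points
-- ===== SOURCE A (Python) =====
-- from copy import deepcopy
--
-- def _the_same_points(points1, points2):
--     if len(points1) != len(points2):
--         return False
--
--     points2 = deepcopy(points2)
--     for point in points1:
--         if point in points2:
--             points2.remove(point)
--         else:
--             return False
--     if points2:
--         return False
--
--     return True
-- ===== SOURCE B (Python) =====
-- def _the_same_points(points1, points2):
--     if len(points1) != len(points2):
--         return False
--     return sorted(points1) == sorted(points2)
-- ===== Notes on version B (the rewrite author's own statement) =====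
-- stated objective: faster
-- what changed: Replaces A's quadratic scan-and-remove over a deep copy with sorting both lists and comparing them linearly.
import Mathlib
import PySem

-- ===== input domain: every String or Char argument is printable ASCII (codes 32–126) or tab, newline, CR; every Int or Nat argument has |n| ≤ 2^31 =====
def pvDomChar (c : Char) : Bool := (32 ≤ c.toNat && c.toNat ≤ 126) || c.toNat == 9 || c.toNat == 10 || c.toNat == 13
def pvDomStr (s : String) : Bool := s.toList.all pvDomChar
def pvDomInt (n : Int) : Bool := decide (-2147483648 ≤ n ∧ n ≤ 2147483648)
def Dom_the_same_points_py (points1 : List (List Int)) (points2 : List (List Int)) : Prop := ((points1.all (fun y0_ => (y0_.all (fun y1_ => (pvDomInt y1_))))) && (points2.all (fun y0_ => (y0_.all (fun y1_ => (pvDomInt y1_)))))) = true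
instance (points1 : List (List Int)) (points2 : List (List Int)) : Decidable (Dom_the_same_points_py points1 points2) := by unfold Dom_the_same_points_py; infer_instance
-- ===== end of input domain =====

-- B replaces A's quadratic scan-and-remove with sort-then-compare (asymptotically faster).
-- ===== PORT A =====
-- the for-loop of A: removes each point of points1 from the (copied) points2; none = the 'return False' branch
def pvALoop_the_same_points_py : List (List Int) → List (List Int) → Option (List (List Int))
  | [], rest => some rest
  | p :: ps, rest =>
    match PySem.List.remove? rest p with
    | some rest' => pvALoop_the_same_points_py ps rest'
    | none => none

def the_same_points_py (points1 : List (List Int)) (points2 : List (List Int)) : Bool :=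
  if points1.length ≠ points2.length then false
  else
    match pvALoop_the_same_points_py points1 points2 with
    | none => false
    | some rest => if rest ≠ [] then false else true

-- ===== PORT B =====
def the_same_points_py_alt (points1 : List (List Int)) (points2 : List (List Int)) : Bool :=
  if points1.length ≠ points2.length then false
  else PySem.List.sorted points1 (fun x => x) false == PySem.List.sorted points2 (fun x => x) false

-- ===== PRECONDITION & SPEC =====
def Spec_the_same_points_py (points1 : List (List Int)) (points2 : List (List Int)) (out : Bool) : Prop := out = the_same_points_py_alt points1 points2
instance (points1 : List (List Int)) (points2 : List (List Int)) (out : Bool) : Decidable (Spec_the_same_points_py points1 points2 out) := by unfold Spec_the_same_points_py; infer_instance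

-- ===== CLAIM (what is proved, stated in full; the proofs are below) =====
def Claim_equal_the_same_points_py : Prop := ∀ (points1 : List (List Int)) (points2 : List (List Int)), Dom_the_same_points_py points1 points2 → Spec_the_same_points_py points1 points2 (the_same_points_py points1 points2)

-- ===== LEMMAS AND PROOFS =====

-- sorted(xs) == sorted(ys) ↔ xs and ys are permutations (library lemma, with the port's elaborated instances)
lemma pvSortedIff (xs ys : List (List Int)) :
    (@PySem.List.sorted (List Int) (List Int) List.instLT (fun a b => a.decidableLT b) xs (fun x => x) false
      = @PySem.List.sorted (List Int) (List Int) List.instLT (fun a b => a.decidableLT b) ys (fun x => x) false) ↔ xs.Perm ys := by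
  have hD : (fun a b : List Int => a.decidableLT b)
      = (fun a b : List Int => LinearOrder.toDecidableLT a b) := by
    funext a b; exact Subsingleton.elim _ _
  rw [hD]
  exact PySem.List.sorted_id_eq_sorted_id_iff_perm xs ys

lemma pvALoop_some_perm (p1 p2 rest : List (List Int))
    (h : pvALoop_the_same_points_py p1 p2 = some rest) : p2.Perm (p1 ++ rest) := by
  induction p1 generalizing p2 with
  | nil => simp [pvALoop_the_same_points_py] at h; simp [h]
  | cons p ps ih =>
    simp only [pvALoop_the_same_points_py] at h
    cases hr : PySem.List.remove? p2 p with
    | none => rw [hr] at h; simp at h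
    | some rest' =>
      rw [hr] at h
      have hmem : p ∈ p2 := by
        by_contra hn
        rw [(PySem.List.remove?_eq_none_iff p2 p).mpr hn] at hr; simp at hr
      have he : PySem.List.remove? p2 p = some (p2.erase p) :=
        PySem.List.remove?_eq_some_erase p2 p hmem
      rw [he] at hr
      injection hr with hr; subst hr
      exact (List.perm_cons_erase hmem).trans ((ih _ h).cons p)

lemma pvPerm_aloop (p1 p2 : List (List Int)) (h : p1.Perm p2) :
    pvALoop_the_same_points_py p1 p2 = some [] := by
  induction p1 generalizing p2 with
  | nil => have := h.nil_eq; simp [pvALoop_the_same_points_py, ← this]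
  | cons p ps ih =>
    have hmem : p ∈ p2 := h.mem_iff.mp (List.mem_cons_self ..)
    simp only [pvALoop_the_same_points_py,
      PySem.List.remove?_eq_some_erase p2 p hmem]
    exact ih _ ((List.perm_cons_erase hmem).symm.trans h.symm).symm.cons_inv

-- ===== VERDICT (by name: the statement is the Claim_ definition above) =====
theorem the_same_points_py_spec : Claim_equal_the_same_points_py := by
  intro p1 p2 _
  unfold Spec_the_same_points_py the_same_points_py the_same_points_py_alt
  by_cases hlen : p1.length ≠ p2.length
  · simp [hlen]
  · simp only [hlen, if_false]
    cases hgo : pvALoop_the_same_points_py p1 p2 with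
    | none =>
      have hnp : ¬ p1.Perm p2 := by
        intro hp
        rw [pvPerm_aloop p1 p2 hp] at hgo; simp at hgo
      symm
      rw [beq_eq_false_iff_ne]
      intro he
      exact hnp ((pvSortedIff p1 p2).mp he)
    | some rest =>
      have hperm := pvALoop_some_perm p1 p2 rest hgo
      have hrest : rest = [] := by
        have h1 : p1.length = p2.length := not_ne_iff.mp hlen
        have h2 := hperm.length_eq
        simp [List.length_append] at h2
        exact List.eq_nil_of_length_eq_zero (by omega)
      subst hrest
      have hp : p1.Perm p2 := by simpa using hperm.symm
      simp [(pvSortedIff p1 p2).mpr hp]
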